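-- pv_equiv track=rewrite | github.com/danking14/DK-MIT-6-0001 | ps2/hangman_with_hints.py | match_with_gaps
-- ===== SOURCE A (Python) =====
-- def match_with_gaps(my_word, other_word):
--     '''
--     my_word: string with _ characters, current guess of secret word
--     other_word: string, regular English word
--     returns: boolean, True if all the actual letters of my_word match the
--         corresponding letters of other_word, or the letter is the special symbol
--         _ , and my_word and other_word are of the same length;
--         False otherwise:
--     '''
--     def check_char(char):
--         return char == "_" or char == " "
--
--     no_space = my_word.replace(" ", "")
--     if len(no_space) != len(other_word):
--         return False
--     for i, char in enumerate(no_space):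
--         if check_char(char):
--             continue
--         else:
--             if char != other_word[i]:
--                 return False
--     return True
-- ===== SOURCE B (Python) =====
-- def match_with_gaps(my_word, other_word):
--     # Single-pass two-pointer scan: no intermediate stripped string, no
--     # separate length check; the cursor j into other_word advances only on
--     # non-space pattern characters, and the length requirement falls out of
--     # j reaching the end exactly when the pattern is exhausted.
--     j = 0
--     n = len(other_word)
--     for ch in my_word:
--         if ch == " ":
--             continue
--         if j == n:
--             return False
--         if ch != "_" and ch != other_word[j]:
--             return False
--         j += 1
--     return j == n
-- ===== Notes on version B (the rewrite author's own statement) =====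
-- stated objective: simpler
-- what changed: Replaced A's three phases (build a space-stripped copy, compare lengths, then an index loop with enumerate and random access into other_word) by one simultaneous two-pointer scan that never materialises the stripped string and folds the length check into cursor exhaustion.
import Mathlib
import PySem

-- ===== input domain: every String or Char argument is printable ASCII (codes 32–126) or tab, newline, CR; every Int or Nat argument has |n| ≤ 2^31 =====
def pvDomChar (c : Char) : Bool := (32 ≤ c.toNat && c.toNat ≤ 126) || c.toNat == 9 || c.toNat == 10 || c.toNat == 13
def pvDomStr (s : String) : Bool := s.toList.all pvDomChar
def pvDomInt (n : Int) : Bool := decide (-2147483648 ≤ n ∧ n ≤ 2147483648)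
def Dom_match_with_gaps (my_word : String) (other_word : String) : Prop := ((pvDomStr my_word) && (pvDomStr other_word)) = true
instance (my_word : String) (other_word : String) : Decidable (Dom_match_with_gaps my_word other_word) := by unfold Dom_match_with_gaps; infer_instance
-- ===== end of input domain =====

-- B replaces A's stripped-copy + length check + index loop by one two-pointer scan (objective: simpler).


-- ===== PORT A =====
-- def check_char(char): return char == "_" or char == " "
def pvCheckChar (c : Char) : Bool := c == '_' || c == ' '

-- the 'for i, char in enumerate(no_space)' loop with its early returns
-- (the 'none' branch of pyGet? is Python's IndexError; it is unreachable here
-- because the loop only runs after the length equality check)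
def pvLoopA : List (Int × Char) → List Char → Bool
  | [], _ => true
  | (i, ch) :: rest, ow =>
    if pvCheckChar ch then pvLoopA rest ow
    else match PySem.List.pyGet? ow i with
      | some c => if ch ≠ c then false else pvLoopA rest ow
      | none => false

def match_with_gaps (my_word : String) (other_word : String) : Bool :=
  let no_space := PySem.Str.replace my_word " " ""
  if no_space.toList.length ≠ other_word.toList.length then false
  else pvLoopA (PySem.List.enumerate no_space.toList) other_word.toList

-- ===== PORT B =====
-- the two-pointer scan of Source B: first list = remaining my_word, second list =
-- the unconsumed suffix other_word[j:]; 'j == n' is emptiness of that suffix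
def pvGoB : List Char → List Char → Bool
  | [], w => w.isEmpty
  | p :: ps, w =>
    if p == ' ' then pvGoB ps w
    else match w with
      | [] => false
      | c :: cs => if p != '_' && p != c then false else pvGoB ps cs

def match_with_gaps_alt (my_word : String) (other_word : String) : Bool :=
  pvGoB my_word.toList other_word.toList

-- ===== PRECONDITION & SPEC =====
def Spec_match_with_gaps (my_word : String) (other_word : String) (out : Bool) : Prop := out = match_with_gaps_alt my_word other_word
instance (my_word : String) (other_word : String) (out : Bool) : Decidable (Spec_match_with_gaps my_word other_word out) := by unfold Spec_match_with_gaps; infer_instance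

-- ===== CLAIM (what is proved, stated in full; the proofs are below) =====
def Claim_equal_match_with_gaps : Prop := ∀ (my_word : String) (other_word : String), Dom_match_with_gaps my_word other_word → Spec_match_with_gaps my_word other_word (match_with_gaps my_word other_word)

-- ===== LEMMAS AND PROOFS =====

-- replacing " " by "" is exactly filtering out spaces
theorem pvReplaceGo_filter (fuel : Nat) (l acc : List Char) (h : l.length ≤ fuel) :
    PySem.Chars.replace.go [' '] [] fuel l acc = acc.reverse ++ l.filter (· ≠ ' ') := by
  induction fuel generalizing l acc with
  | zero =>
    rw [PySem.Chars.replace.go.eq_def]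
    have : l = [] := List.eq_nil_of_length_eq_zero (Nat.le_zero.mp h)
    subst this; simp
  | succ n ih =>
    rw [PySem.Chars.replace.go.eq_def]
    match l with
    | [] => simp
    | c :: t =>
      simp only [List.length_cons] at h
      by_cases hc : c = ' '
      · subst hc
        simp [List.isPrefixOf, ih t acc (by omega)]
      · have hbc : (' ' == c) = false := by simp [Ne.symm hc]
        simp [List.isPrefixOf, hbc, hc, ih t (c :: acc) (by omega)]

theorem pvReplace_filter (s : String) :
    (PySem.Str.replace s " " "").toList = s.toList.filter (· ≠ ' ') := by
  have : (PySem.Str.replace s " " "").toList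
      = PySem.Chars.replace s.toList " ".toList "".toList := by
    simp [PySem.Str.toList_replace]
  rw [this]
  show PySem.Chars.replace s.toList [' '] [] = _
  unfold PySem.Chars.replace
  simp only [List.isEmpty_cons, if_false, Bool.false_eq_true]
  exact pvReplaceGo_filter s.toList.length s.toList [] le_rfl

-- B ignores spaces in the pattern
theorem pvGoB_filter (p w : List Char) :
    pvGoB p w = pvGoB (p.filter (· ≠ ' ')) w := by
  induction p generalizing w with
  | nil => rfl
  | cons c cs ih =>
    by_cases hc : c = ' '
    · subst hc; simp [pvGoB, ih]
    · simp only [List.filter_cons, decide_eq_true_eq]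
      rw [if_pos hc]
      cases w <;> simp [pvGoB, hc, ih]

-- a space-free pattern of the wrong length never matches
theorem pvGoB_length_ne (xs w : List Char) (hs : ∀ c ∈ xs, c ≠ ' ')
    (h : xs.length ≠ w.length) : pvGoB xs w = false := by
  induction xs generalizing w with
  | nil =>
    cases w with
    | nil => simp at h
    | cons c cs => simp [pvGoB]
  | cons p ps ih =>
    have hp : p ≠ ' ' := hs p (List.mem_cons_self ..)
    cases w with
    | nil => simp [pvGoB, hp]
    | cons c cs =>
      simp only [pvGoB, beq_eq_false_iff_ne.mpr hp, Bool.false_eq_true, if_false]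
      split
      · rfl
      · exact ih cs (fun x hx => hs x (List.mem_cons_of_mem _ hx))
          (by simp only [List.length_cons] at h ⊢; omega)

-- A's enumerate/index loop equals B's scan on the unconsumed suffix
theorem pvLoopA_eq_goB (xs : List Char) (w : List Char) (k : Nat)
    (hs : ∀ c ∈ xs, c ≠ ' ') (hlen : k + xs.length = w.length) :
    pvLoopA (PySem.List.enumerate xs (k : Int)) w = pvGoB xs (w.drop k) := by
  induction xs generalizing k with
  | nil =>
    have : w.drop k = [] := List.drop_eq_nil_of_le (by simp at hlen; omega)
    simp [PySem.List.enumerate_nil, pvLoopA, pvGoB, this]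
  | cons ch rest ih =>
    have hch : ch ≠ ' ' := hs ch (List.mem_cons_self ..)
    have hk : k < w.length := by simp at hlen; omega
    have hdrop : w.drop k = w[k] :: w.drop (k + 1) := List.drop_eq_getElem_cons hk
    have hih : pvLoopA (PySem.List.enumerate rest ((k : Int) + 1)) w = pvGoB rest (w.drop (k + 1)) := by
      have := ih (k + 1) (fun c hc => hs c (List.mem_cons_of_mem _ hc)) (by simp at hlen ⊢; omega)
      simpa [Int.natCast_add] using this
    have hget : PySem.List.pyGet? w (k : Int) = some w[k] := by
      rw [PySem.List.pyGet?_natCast, List.getElem?_eq_getElem hk]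
    rw [PySem.List.enumerate_cons, hdrop]
    by_cases h_ : ch = '_'
    · subst h_
      simp only [pvLoopA, pvCheckChar, pvGoB, hih]
      norm_num
      exact fun h => absurd h (by decide)
    · have hcc : pvCheckChar ch = false := by simp [pvCheckChar, h_, hch]
      simp only [pvLoopA, hcc, Bool.false_eq_true, if_false, hget, pvGoB,
        beq_eq_false_iff_ne.mpr hch, hih]
      by_cases heq : ch = w[k]
      · simp [heq, hih]
      · simp [heq, h_, bne_iff_ne]

-- ===== VERDICT (by name: the statement is the Claim_ definition above) =====
theorem match_with_gaps_spec : Claim_equal_match_with_gaps := by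
  intro my_word other_word _
  unfold Spec_match_with_gaps match_with_gaps match_with_gaps_alt
  have hrep := pvReplace_filter my_word
  set F := my_word.toList.filter (· ≠ ' ') with hF
  have hsf : ∀ c ∈ F, c ≠ ' ' := by
    intro c hc; rw [hF] at hc; simp [List.mem_filter] at hc; exact hc.2
  rw [pvGoB_filter my_word.toList other_word.toList, ← hF]
  simp only [hrep]
  by_cases hlen : F.length ≠ other_word.toList.length
  · rw [if_pos hlen, pvGoB_length_ne F other_word.toList hsf hlen]
  · rw [if_neg hlen]
    push_neg at hlen
    have := pvLoopA_eq_goB F other_word.toList 0 hsf (by omega)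
    simpa using this
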